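-- pv_equiv track=rewrite | github.com/PatilHiteshB/Competetive | Python/PrefixSuffixString/PrefixSuffixString.py | prefixSuffixString
-- ===== SOURCE A (Python) =====
-- def prefixSuffixString(s1, s2) -> int:
--     #code here
--     i, j = 0, 0
--     n, m = len(s1), len(s2)
--     ans = 0
--
--     while i<n and j<m:
--
--         if s2[j] in s1[i]:
--
--             ln = len(s2[j])
--             pre = s1[i][:ln]
--             suf = s1[i][-ln:]
--
--             if pre == s2[j] or suf == s2[j]:
--                 ans += 1
--                 i = 0
--                 j += 1
--             else:
--                 i += 1
--
--         else:
--             i += 1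
--
--     return ans
-- ===== SOURCE B (Python) =====
-- def prefixSuffixString(s1, s2) -> int:
--     # index every prefix and suffix of the s1 words once, then answer each
--     # s2 word with one set lookup, stopping at the first miss
--     affixes = set()
--     for x in s1:
--         for k in range(len(x) + 1):
--             affixes.add(x[:k])
--             affixes.add(x[k:])
--     ans = 0
--     for w in s2:
--         if w not in affixes:
--             break
--         ans += 1
--     return ans
-- ===== Notes on version B (the rewrite author's own statement) =====
-- stated objective: alternative
-- what changed: B replaces A's restart-scanning while-loop (reset i to 0 after every matched word, substring test plus slice comparisons per pair) by a one-time set index of all prefixes and suffixes of the s1 words, answering each s2 word with a single set lookup and stopping at the first miss.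
import Mathlib
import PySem

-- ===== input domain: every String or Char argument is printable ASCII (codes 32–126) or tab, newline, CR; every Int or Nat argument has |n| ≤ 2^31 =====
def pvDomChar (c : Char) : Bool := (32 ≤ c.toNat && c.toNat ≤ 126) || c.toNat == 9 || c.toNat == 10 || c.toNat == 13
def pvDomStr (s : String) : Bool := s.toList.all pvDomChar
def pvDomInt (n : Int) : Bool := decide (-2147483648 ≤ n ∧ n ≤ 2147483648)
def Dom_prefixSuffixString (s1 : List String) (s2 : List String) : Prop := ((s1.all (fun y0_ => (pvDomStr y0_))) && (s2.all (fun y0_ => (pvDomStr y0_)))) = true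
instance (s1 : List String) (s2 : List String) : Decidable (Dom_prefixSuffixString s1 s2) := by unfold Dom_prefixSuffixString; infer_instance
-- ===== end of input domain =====

-- B replaces A's restart-scanning while-loop by a one-time set index of all prefixes
-- and suffixes of the s1 words, answering each s2 word with one set lookup (objective: alternative).


-- ===== PORT A =====
-- A's while-loop: state (i, j, ans); on a prefix/suffix hit reset i to 0 and advance j, else i += 1.
def pvLoopA (s1 s2 : List String) (i j : Nat) (ans : Int) : Int :=
  if h : i < s1.length ∧ j < s2.length then
    if PySem.Str.isIn (s2[j]'h.2) (s1[i]'h.1) = true then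
      if PySem.Str.slice (s1[i]'h.1) none (some (PySem.Str.len (s2[j]'h.2))) = s2[j]'h.2
          ∨ PySem.Str.slice (s1[i]'h.1) (some (-(PySem.Str.len (s2[j]'h.2)))) none = s2[j]'h.2 then
        pvLoopA s1 s2 0 (j + 1) (ans + 1)
      else
        pvLoopA s1 s2 (i + 1) j ans
    else
      pvLoopA s1 s2 (i + 1) j ans
  else ans
termination_by (s2.length - j, s1.length - i)

def prefixSuffixString (s1 : List String) (s2 : List String) : Int :=
  pvLoopA s1 s2 0 0 0

-- ===== PORT B =====
-- the set of all x[:k] and x[k:] over x in s1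
def pvAffixes (s1 : List String) : PySem.Set String :=
  s1.foldl (fun aff x =>
    (PySem.List.pyRange 0 (PySem.Str.len x + 1)).foldl
      (fun a k => PySem.Set.add (PySem.Set.add a (PySem.Str.slice x none (some k)))
                    (PySem.Str.slice x (some k) none))
      aff)
    PySem.Set.empty

-- 'for w in s2: if w not in affixes: break; ans += 1'
def pvCountB (aff : PySem.Set String) (s2 : List String) (ans : Int) : Int :=
  match s2 with
  | [] => ans
  | w :: rest => if PySem.Set.contains aff w = true then pvCountB aff rest (ans + 1) else ans

def prefixSuffixString_alt (s1 : List String) (s2 : List String) : Int :=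
  pvCountB (pvAffixes s1) s2 0

-- ===== PRECONDITION & SPEC =====
def Spec_prefixSuffixString (s1 : List String) (s2 : List String) (out : Int) : Prop := out = prefixSuffixString_alt s1 s2
instance (s1 : List String) (s2 : List String) (out : Int) : Decidable (Spec_prefixSuffixString s1 s2 out) := by unfold Spec_prefixSuffixString; infer_instance

-- ===== CLAIM (what is proved, stated in full; the proofs are below) =====
def Claim_equal_prefixSuffixString : Prop := ∀ (s1 : List String) (s2 : List String), Dom_prefixSuffixString s1 s2 → Spec_prefixSuffixString s1 s2 (prefixSuffixString s1 s2)

-- ===== LEMMAS AND PROOFS =====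

-- A's per-pair test, as one Bool (proof-side only)
def pvCond (x w : String) : Bool :=
  PySem.Str.isIn w x &&
    (decide (PySem.Str.slice x none (some (PySem.Str.len w)) = w) ||
     decide (PySem.Str.slice x (some (-(PySem.Str.len w))) none = w))

lemma pv_toList_eq_iff (s t : String) : s.toList = t.toList ↔ s = t :=
  ⟨fun h => String.ext h, fun h => by rw [h]⟩

-- A's test holds iff w is a prefix or a suffix of x
lemma pv_cond_iff (x w : String) :
    pvCond x w = true ↔ (w.toList <+: x.toList ∨ w.toList <:+ x.toList) := by
  have hlen : PySem.Str.len w = (w.toList.length : Int) := PySem.Str.len_eq w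
  have hpre : PySem.Str.slice x none (some (PySem.Str.len w)) = w ↔ w.toList <+: x.toList := by
    rw [← pv_toList_eq_iff, PySem.Str.toList_slice, PySem.Chars.slice_eq_listSlice, hlen,
      PySem.List.slice_to _ (by positivity)]
    simp only [Int.toNat_natCast]
    rw [List.prefix_iff_eq_take]
    constructor <;> (intro h; exact h.symm)
  constructor
  · intro h
    simp only [pvCond, Bool.and_eq_true, Bool.or_eq_true, decide_eq_true_eq] at h
    rcases h.2 with h2 | h2
    · exact Or.inl (hpre.mp h2)
    · by_cases h0 : w.toList.length = 0
      · left
        have : w.toList = [] := List.eq_nil_of_length_eq_zero h0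
        rw [this]; exact List.nil_prefix
      · right
        rw [← pv_toList_eq_iff, PySem.Str.toList_slice, PySem.Chars.slice_eq_listSlice, hlen,
          PySem.List.slice_from_neg_natCast _ _ (by omega)] at h2
        rw [List.suffix_iff_eq_drop]
        exact h2.symm
  · intro h
    have hinfix : w.toList <:+: x.toList := by
      rcases h with h | h
      · exact h.isInfix
      · exact h.isInfix
    simp only [pvCond, Bool.and_eq_true, Bool.or_eq_true, decide_eq_true_eq]
    refine ⟨(PySem.Str.isIn_iff_infix w x).mpr hinfix, ?_⟩
    rcases h with h | h
    · left
      rw [← pv_toList_eq_iff, PySem.Str.toList_slice, PySem.Chars.slice_eq_listSlice, hlen,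
        PySem.List.slice_to _ (by positivity)]
      simp only [Int.toNat_natCast]
      exact (List.prefix_iff_eq_take.mp h).symm
    · by_cases h0 : w.toList.length = 0
      · left
        rw [← pv_toList_eq_iff, PySem.Str.toList_slice, PySem.Chars.slice_eq_listSlice, hlen,
          PySem.List.slice_to _ (by positivity)]
        simp only [Int.toNat_natCast, h0, List.take_zero]
        exact (List.eq_nil_of_length_eq_zero h0).symm
      · right
        rw [← pv_toList_eq_iff, PySem.Str.toList_slice, PySem.Chars.slice_eq_listSlice, hlen,
          PySem.List.slice_from_neg_natCast _ _ (by omega)]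
        exact (List.suffix_iff_eq_drop.mp h).symm

lemma pv_mem_inner (x : String) (l : List Int) (aff : PySem.Set String) (w : String) :
    w ∈ l.foldl (fun a k => PySem.Set.add (PySem.Set.add a (PySem.Str.slice x none (some k)))
        (PySem.Str.slice x (some k) none)) aff
    ↔ w ∈ aff ∨ ∃ k ∈ l, (w = PySem.Str.slice x none (some k) ∨ w = PySem.Str.slice x (some k) none) := by
  induction l generalizing aff with
  | nil => simp
  | cons k l ih =>
    rw [List.foldl_cons, ih]
    simp only [PySem.Set.mem_add, List.mem_cons]
    constructor
    · rintro (((h | h) | h) | ⟨k', hk', h⟩)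
      · exact Or.inl h
      · exact Or.inr ⟨k, Or.inl rfl, Or.inl h⟩
      · exact Or.inr ⟨k, Or.inl rfl, Or.inr h⟩
      · exact Or.inr ⟨k', Or.inr hk', h⟩
    · rintro (h | ⟨k', (rfl | hk'), h⟩)
      · exact Or.inl (Or.inl (Or.inl h))
      · rcases h with h | h
        · exact Or.inl (Or.inl (Or.inr h))
        · exact Or.inl (Or.inr h)
      · exact Or.inr ⟨k', hk', h⟩

lemma pv_affix_char (x w : String) :
    (∃ k ∈ PySem.List.pyRange 0 (PySem.Str.len x + 1),
        (w = PySem.Str.slice x none (some k) ∨ w = PySem.Str.slice x (some k) none))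
    ↔ (w.toList <+: x.toList ∨ w.toList <:+ x.toList) := by
  have hlen : PySem.Str.len x = (x.toList.length : Int) := PySem.Str.len_eq x
  constructor
  · rintro ⟨k, hk, h⟩
    rw [PySem.List.mem_pyRange_one] at hk
    rcases h with h | h
    · left
      rw [← pv_toList_eq_iff, PySem.Str.toList_slice, PySem.Chars.slice_eq_listSlice,
        PySem.List.slice_to _ hk.1] at h
      rw [h]; exact List.take_prefix _ _
    · right
      rw [← pv_toList_eq_iff, PySem.Str.toList_slice, PySem.Chars.slice_eq_listSlice,
        PySem.List.slice_from _ hk.1] at h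
      rw [h]; exact List.drop_suffix _ _
  · rintro (h | h)
    · refine ⟨(w.toList.length : Int), ?_, Or.inl ?_⟩
      · rw [PySem.List.mem_pyRange_one, hlen]
        have := h.length_le
        omega
      · rw [← pv_toList_eq_iff, PySem.Str.toList_slice, PySem.Chars.slice_eq_listSlice,
          PySem.List.slice_to _ (by positivity)]
        simp only [Int.toNat_natCast]
        exact List.prefix_iff_eq_take.mp h
    · refine ⟨((x.toList.length - w.toList.length : Nat) : Int), ?_, Or.inr ?_⟩
      · rw [PySem.List.mem_pyRange_one, hlen]
        omega
      · rw [← pv_toList_eq_iff, PySem.Str.toList_slice, PySem.Chars.slice_eq_listSlice,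
          PySem.List.slice_from _ (by positivity)]
        simp only [Int.toNat_natCast]
        exact List.suffix_iff_eq_drop.mp h

lemma pv_mem_affixes (s1 : List String) (w : String) :
    w ∈ pvAffixes s1 ↔ ∃ x ∈ s1, (w.toList <+: x.toList ∨ w.toList <:+ x.toList) := by
  have main : ∀ (l : List String) (aff : PySem.Set String),
      w ∈ l.foldl (fun aff x =>
        (PySem.List.pyRange 0 (PySem.Str.len x + 1)).foldl
          (fun a k => PySem.Set.add (PySem.Set.add a (PySem.Str.slice x none (some k)))
            (PySem.Str.slice x (some k) none)) aff) aff
      ↔ w ∈ aff ∨ ∃ x ∈ l, (w.toList <+: x.toList ∨ w.toList <:+ x.toList) := by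
    intro l
    induction l with
    | nil => simp
    | cons x l ih =>
      intro aff
      rw [List.foldl_cons, ih, pv_mem_inner, pv_affix_char]
      simp only [List.mem_cons]
      constructor
      · rintro ((h | h) | ⟨x', hx', h⟩)
        · exact Or.inl h
        · exact Or.inr ⟨x, Or.inl rfl, h⟩
        · exact Or.inr ⟨x', Or.inr hx', h⟩
      · rintro (h | ⟨x', (rfl | hx'), h⟩)
        · exact Or.inl (Or.inl h)
        · exact Or.inl (Or.inr h)
        · exact Or.inr ⟨x', hx', h⟩
  rw [pvAffixes, main]
  simp [PySem.Set.empty]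

lemma pv_countB_eq (aff : PySem.Set String) (s2 : List String) (ans : Int) :
    pvCountB aff s2 ans = ans + ((s2.takeWhile (fun w => PySem.Set.contains aff w)).length : Int) := by
  induction s2 generalizing ans with
  | nil => simp [pvCountB]
  | cons w rest ih =>
    by_cases h : PySem.Set.contains aff w = true
    · rw [pvCountB, if_pos h, ih, List.takeWhile_cons, if_pos h]
      simp; ring
    · rw [pvCountB, if_neg h, List.takeWhile_cons, if_neg h]
      simp

lemma pv_scan (s1 s2 : List String) (j : Nat) (hj : j < s2.length) :
    ∀ (d i : Nat), s1.length - i = d → ∀ (ans : Int),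
      pvLoopA s1 s2 i j ans =
        if ((s1.drop i).any (fun x => pvCond x (s2[j]'hj))) = true
        then pvLoopA s1 s2 0 (j + 1) (ans + 1) else ans := by
  intro d
  induction d with
  | zero =>
    intro i hd ans
    have hi : s1.length ≤ i := by omega
    rw [pvLoopA, dif_neg (by omega), List.drop_eq_nil_of_le hi]
    simp
  | succ d ih =>
    intro i hd ans
    have hi : i < s1.length := by omega
    rw [List.drop_eq_getElem_cons hi, List.any_cons]
    rw [pvLoopA, dif_pos ⟨hi, hj⟩]
    by_cases hc : pvCond (s1[i]'hi) (s2[j]'hj) = true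
    · simp only [pvCond, Bool.and_eq_true, Bool.or_eq_true, decide_eq_true_eq] at hc
      rw [if_pos hc.1, if_pos hc.2]
      rw [if_pos (by simp only [Bool.or_eq_true]; left; simp only [pvCond, Bool.and_eq_true,
        Bool.or_eq_true, decide_eq_true_eq]; exact hc)]
    · have hrec : pvLoopA s1 s2 (i + 1) j ans =
          if ((s1.drop (i + 1)).any (fun x => pvCond x (s2[j]'hj))) = true
          then pvLoopA s1 s2 0 (j + 1) (ans + 1) else ans := ih (i + 1) (by omega) ans
      have hcfalse : pvCond (s1[i]'hi) (s2[j]'hj) = false := by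
        simpa using hc
      rw [hcfalse, Bool.false_or]
      simp only [pvCond, Bool.and_eq_true, Bool.or_eq_true, decide_eq_true_eq, not_and,
        not_or] at hc
      by_cases hin : PySem.Str.isIn (s2[j]'hj) (s1[i]'hi) = true
      · rw [if_pos hin, if_neg (not_or.mpr (hc hin)), hrec]
      · rw [if_neg hin, hrec]

lemma pv_outer (s1 s2 : List String) :
    ∀ (d j : Nat), s2.length - j = d → ∀ (ans : Int),
      pvLoopA s1 s2 0 j ans =
        ans + (((s2.drop j).takeWhile (fun w => s1.any (fun x => pvCond x w))).length : Int) := by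
  intro d
  induction d with
  | zero =>
    intro j hd ans
    have hjm : s2.length ≤ j := by omega
    rw [List.drop_eq_nil_of_le hjm]
    rw [pvLoopA, dif_neg (by omega)]
    simp
  | succ d ih =>
    intro j hd ans
    have hj : j < s2.length := by omega
    rw [pv_scan s1 s2 j hj _ 0 rfl ans, List.drop_zero, List.drop_eq_getElem_cons hj,
      List.takeWhile_cons]
    by_cases ha : s1.any (fun x => pvCond x (s2[j]'hj)) = true
    · rw [if_pos ha, if_pos ha, ih (j + 1) (by omega) (ans + 1)]
      simp; ring
    · rw [if_neg ha, if_neg ha]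
      simp

lemma pv_takeWhile_congr {α : Type} (p q : α → Bool) (l : List α)
    (h : ∀ x ∈ l, p x = q x) : l.takeWhile p = l.takeWhile q := by
  induction l with
  | nil => rfl
  | cons x l ih =>
    rw [List.takeWhile_cons, List.takeWhile_cons, h x (List.mem_cons_self ..)]
    split
    · rw [ih (fun y hy => h y (List.mem_cons_of_mem _ hy))]
    · rfl

-- ===== VERDICT (by name: the statement is the Claim_ definition above) =====
theorem prefixSuffixString_spec : Claim_equal_prefixSuffixString := by
  intro s1 s2 _
  show prefixSuffixString s1 s2 = prefixSuffixString_alt s1 s2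
  rw [prefixSuffixString, prefixSuffixString_alt,
    pv_outer s1 s2 s2.length 0 (by omega) 0, pv_countB_eq, List.drop_zero]
  have hpt : ∀ w ∈ s2, (s1.any fun x => pvCond x w) = PySem.Set.contains (pvAffixes s1) w := by
    intro w _
    have h1 : s1.any (fun x => pvCond x w) = true ↔
        ∃ x ∈ s1, (w.toList <+: x.toList ∨ w.toList <:+ x.toList) := by
      rw [List.any_eq_true]
      constructor
      · rintro ⟨x, hx, hc⟩; exact ⟨x, hx, (pv_cond_iff x w).mp hc⟩
      · rintro ⟨x, hx, hp⟩; exact ⟨x, hx, (pv_cond_iff x w).mpr hp⟩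
    have h2 : PySem.Set.contains (pvAffixes s1) w = true ↔
        ∃ x ∈ s1, (w.toList <+: x.toList ∨ w.toList <:+ x.toList) := by
      rw [PySem.Set.contains_iff, pv_mem_affixes]
    rw [Bool.eq_iff_iff, h1, h2]
  rw [pv_takeWhile_congr _ _ s2 hpt]
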